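-- pv_equiv track=rewrite | github.com/naoyama88/wmad_python | 20190530/problem02.py | array_search
-- ===== SOURCE A (Python) =====
-- def array_search(haystack, thread):
--     """
--     return -1 if thread does not exist in haystack
--     or return the index of haystack if thread exists in haystack
--     :param haystack: array of integers:
--     :param thread: number: target number
--     :return: tuple(-1, 0) or tuple(
--                 0: The index of the first occurrence
--                 1: The count which is how many times thread exists in haystack
--             )
--     """
--     length = len(haystack)
--     found = False
--     count = 0
--     for i in range(length):
--         if haystack[i] == thread:
--             count += 1
--             if not found:
--                 index = i
--                 found = True
--     if found:
--         return index, count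
--     else:
--         return -1, 0
-- ===== SOURCE B (Python) =====
-- def array_search(haystack, thread):
--     if thread in haystack:
--         return haystack.index(thread), haystack.count(thread)
--     return -1, 0
-- ===== Notes on version B (the rewrite author's own statement) =====
-- stated objective: idiomatic
-- what changed: Replaces the fused index loop threading a found flag, saved index and running count with a membership test plus the built-in index/count scans.
import Mathlib
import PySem

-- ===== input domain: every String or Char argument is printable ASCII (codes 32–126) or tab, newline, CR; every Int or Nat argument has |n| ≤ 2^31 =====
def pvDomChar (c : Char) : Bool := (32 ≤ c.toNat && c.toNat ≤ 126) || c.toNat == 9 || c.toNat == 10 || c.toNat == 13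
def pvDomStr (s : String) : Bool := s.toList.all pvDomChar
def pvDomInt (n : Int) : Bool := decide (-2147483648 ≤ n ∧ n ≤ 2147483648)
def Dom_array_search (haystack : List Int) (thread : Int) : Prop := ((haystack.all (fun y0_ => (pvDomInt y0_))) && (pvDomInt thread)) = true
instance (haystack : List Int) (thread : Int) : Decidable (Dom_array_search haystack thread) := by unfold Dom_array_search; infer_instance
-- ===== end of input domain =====

-- B replaces A's fused flag/index/count loop with a membership test plus built-in index/count (idiomatic).

-- ===== PORT A =====
-- literal port: loop i over range(len(haystack)), state (found, index, count)
def array_search (haystack : List Int) (thread : Int) : Int × Int :=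
  let length : Int := haystack.length
  let st := (PySem.List.pyRange 0 length 1).foldl
    (fun (s : Bool × Int × Int) i =>
      if PySem.List.pyGetD haystack i 0 == thread then
        let count := s.2.2 + 1
        if !s.1 then (true, i, count) else (s.1, s.2.1, count)
      else s)
    (false, 0, 0)
  if st.1 then (st.2.1, st.2.2) else (-1, 0)

-- ===== PORT B =====
def array_search_alt (haystack : List Int) (thread : Int) : Int × Int :=
  match PySem.List.index? haystack thread with
  | some i => ((i : Int), (PySem.List.count haystack thread : Int))
  | none => (-1, 0)

-- ===== PRECONDITION & SPEC =====
def Spec_array_search (haystack : List Int) (thread : Int) (out : Int × Int) : Prop := out = array_search_alt haystack thread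
instance (haystack : List Int) (thread : Int) (out : Int × Int) : Decidable (Spec_array_search haystack thread out) := by unfold Spec_array_search; infer_instance

-- ===== CLAIM (what is proved, stated in full; the proofs are below) =====
def Claim_equal_array_search : Prop := ∀ (haystack : List Int) (thread : Int), Dom_array_search haystack thread → Spec_array_search haystack thread (array_search haystack thread)

-- ===== LEMMAS AND PROOFS =====

-- abbreviation for A's loop body (proof-side helper)
def asStep (haystack : List Int) (thread : Int) : (Bool × Int × Int) → Int → (Bool × Int × Int) :=
  fun s i =>
    if PySem.List.pyGetD haystack i 0 == thread then
      let count := s.2.2 + 1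
      if !s.1 then (true, i, count) else (s.1, s.2.1, count)
    else s

-- the loop over index/value pairs, once found: only the count grows
lemma loop_found (thread : Int) (xs : List Int) (s ix c : Int) (full : List Int)
    (h : ∀ p ∈ PySem.List.enumerate xs s, PySem.List.pyGetD full p.1 0 = p.2) :
    (PySem.List.enumerate xs s).foldl
      (fun (acc : Bool × Int × Int) (p : Int × Int) => asStep full thread acc p.1)
      (true, ix, c) = (true, ix, c + (xs.count thread : Int)) := by
  induction xs generalizing s c with
  | nil => simp [PySem.List.enumerate_nil]
  | cons x xs ih =>
    rw [PySem.List.enumerate_cons, List.foldl_cons]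
    have hx : PySem.List.pyGetD full s 0 = x :=
      h (s, x) (by rw [PySem.List.enumerate_cons]; exact List.mem_cons_self)
    have hrest : ∀ p ∈ PySem.List.enumerate xs (s+1), PySem.List.pyGetD full p.1 0 = p.2 := by
      intro p hp; exact h p (by rw [PySem.List.enumerate_cons]; exact List.mem_cons_of_mem _ hp)
    by_cases hxe : x = thread
    · have hstep : asStep full thread (true, ix, c) (s, x).1 = (true, ix, c + 1) := by
        simp [asStep, hx, hxe]
      rw [hstep, ih (s+1) (c+1) hrest]
      simp [hxe]
      ring
    · have hstep : asStep full thread (true, ix, c) (s, x).1 = (true, ix, c) := by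
        simp [asStep, hx]
        intro he; exact absurd he hxe
      rw [hstep, ih (s+1) c hrest]
      simp [hxe]

-- the loop before the first hit
lemma loop_notfound (thread : Int) (xs : List Int) (s ix c : Int) (full : List Int)
    (h : ∀ p ∈ PySem.List.enumerate xs s, PySem.List.pyGetD full p.1 0 = p.2) :
    (PySem.List.enumerate xs s).foldl
      (fun (acc : Bool × Int × Int) (p : Int × Int) => asStep full thread acc p.1)
      (false, ix, c) =
      match PySem.List.index? xs thread with
      | none => (false, ix, c)
      | some k => (true, s + (k : Int), c + (xs.count thread : Int)) := by
  induction xs generalizing s c with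
  | nil => simp [PySem.List.enumerate_nil, PySem.List.index?]
  | cons x xs ih =>
    rw [PySem.List.enumerate_cons, List.foldl_cons]
    have hx : PySem.List.pyGetD full s 0 = x :=
      h (s, x) (by rw [PySem.List.enumerate_cons]; exact List.mem_cons_self)
    have hrest : ∀ p ∈ PySem.List.enumerate xs (s+1), PySem.List.pyGetD full p.1 0 = p.2 := by
      intro p hp; exact h p (by rw [PySem.List.enumerate_cons]; exact List.mem_cons_of_mem _ hp)
    by_cases hxe : x = thread
    · have hstep : asStep full thread (false, ix, c) (s, x).1 = (true, s, c + 1) := by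
        simp [asStep, hx, hxe]
      rw [hstep, loop_found thread xs (s+1) s (c+1) full hrest, hxe,
        PySem.List.index?_cons_self]
      simp
      ring
    · have hne : x ≠ thread := hxe
      have hstep : asStep full thread (false, ix, c) (s, x).1 = (false, ix, c) := by
        simp [asStep, hx]
        intro he; exact absurd he hxe
      rw [hstep, ih (s+1) c hrest, PySem.List.index?_cons_of_ne xs hne]
      rcases hidx : PySem.List.index? xs thread with _ | k
      · simp
      · simp [hxe]
        ring

-- ===== VERDICT (by name: the statement is the Claim_ definition above) =====
theorem array_search_spec : Claim_equal_array_search := by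
  intro haystack thread _
  unfold Spec_array_search array_search_alt
  have hvals : ∀ p ∈ PySem.List.enumerate haystack 0, PySem.List.pyGetD haystack p.1 0 = p.2 := by
    intro p hp
    rw [PySem.List.mem_enumerate_iff] at hp
    obtain ⟨k, hk, rfl⟩ := hp
    simp [PySem.List.pyGetD_natCast, List.getD_eq_getElem?_getD, List.getElem?_eq_getElem hk]
  have henum : PySem.List.enumerate haystack 0 =
      (PySem.List.pyRange 0 (haystack.length : Int) 1).map
        (fun j => (j, PySem.List.pyGetD haystack j 0)) := by
    simpa using PySem.List.enumerate_eq_map_pyRange haystack 0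
  have hfold :
      (PySem.List.pyRange 0 (haystack.length : Int) 1).foldl
        (asStep haystack thread) (false, 0, 0) =
      (PySem.List.enumerate haystack 0).foldl
        (fun (acc : Bool × Int × Int) (p : Int × Int) => asStep haystack thread acc p.1)
        (false, 0, 0) := by
    rw [henum, List.foldl_map]
  have hmain := hfold.trans (loop_notfound thread haystack 0 0 0 haystack hvals)
  show (let st := (PySem.List.pyRange 0 ((haystack.length : Int)) 1).foldl
          (asStep haystack thread) (false, 0, 0);
        if st.1 then (st.2.1, st.2.2) else (-1, 0)) = _
  rw [hmain]
  rcases hidx : PySem.List.index? haystack thread with _ | k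
  · simp
  · simp [PySem.List.count]
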